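-- pv_equiv track=rewrite | github.com/CodingWithKim/TopCodersPractice | england.py | print_uk_flag
-- ===== SOURCE A (Python) =====
-- def print_uk_flag(num):
--     row = []
--     mid = num // 2
--     end = num - 1
--     for i in range(num):
--         current = []
--         for j in range(num):
--             if i == j or i == mid or j == mid or j == end:
--                 current.append(0)
--             else:
--                 current.append(1)
--         row.append(current)
--         end -= 1
--     return row
-- ===== SOURCE B (Python) =====
-- def print_uk_flag(num):
--     grid = [[1] * num for _ in range(num)]
--     mid = num // 2
--     for i in range(num):
--         grid[i][i] = 0
--         grid[i][num - 1 - i] = 0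
--         grid[i][mid] = 0
--     if num > 0:
--         grid[mid] = [0] * num
--     return grid
-- ===== Notes on version B (the rewrite author's own statement) =====
-- stated objective: simpler
-- what changed: B pre-fills an n-by-n grid with 1 and then draws the zero lines (both diagonals, middle column, middle row) in separate passes, instead of testing four conditions for every cell.
import Mathlib
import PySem

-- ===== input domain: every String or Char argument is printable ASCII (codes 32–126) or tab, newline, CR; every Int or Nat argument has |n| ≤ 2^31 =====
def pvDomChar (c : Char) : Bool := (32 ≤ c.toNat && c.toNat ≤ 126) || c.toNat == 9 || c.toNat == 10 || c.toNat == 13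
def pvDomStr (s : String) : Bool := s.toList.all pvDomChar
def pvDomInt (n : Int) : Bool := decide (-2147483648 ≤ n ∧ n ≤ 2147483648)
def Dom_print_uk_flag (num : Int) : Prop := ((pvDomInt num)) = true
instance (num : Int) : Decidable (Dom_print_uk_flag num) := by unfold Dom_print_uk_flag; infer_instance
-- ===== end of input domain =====

-- B is a simpler decomposition: pre-fill the grid with 1 and draw the zero lines in separate
-- passes, instead of testing four conditions per cell. Equivalence of the RETURN values is proved.

-- ===== PORT A =====
def print_uk_flag (num : Int) : List (List Int) :=
  let mid := PySem.Int.floordiv num 2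
  let st :=
    (PySem.List.pyRange 0 num 1).foldl
      (fun (st : List (List Int) × Int) i =>
        let current :=
          (PySem.List.pyRange 0 num 1).foldl
            (fun cur j =>
              cur ++ [if i = j ∨ i = mid ∨ j = mid ∨ j = st.2 then (0 : Int) else 1])
            []
        (st.1 ++ [current], st.2 - 1))
      ([], num - 1)
  st.1

-- ===== PORT B =====
-- `[1] * num` / `[0] * num`: List.replicate num.toNat is exact (Python yields [] for num ≤ 0).
-- All indices assigned in the loop are nonnegative and in range for every i in range(num),
-- so nat-indexed List.set/getD transcribes the in-place assignments exactly.
def print_uk_flag_alt (num : Int) : List (List Int) :=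
  let grid0 := (PySem.List.pyRange 0 num 1).map (fun _ => List.replicate num.toNat (1 : Int))
  let mid := PySem.Int.floordiv num 2
  let grid :=
    (PySem.List.pyRange 0 num 1).foldl
      (fun g i =>
        let g := g.set i.toNat ((g.getD i.toNat []).set i.toNat 0)
        let g := g.set i.toNat ((g.getD i.toNat []).set (num - 1 - i).toNat 0)
        g.set i.toNat ((g.getD i.toNat []).set mid.toNat 0))
      grid0
  if num > 0 then grid.set mid.toNat (List.replicate num.toNat 0) else grid

-- ===== PRECONDITION & SPEC =====
def Spec_print_uk_flag (num : Int) (out : List (List Int)) : Prop := out = print_uk_flag_alt num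
instance (num : Int) (out : List (List Int)) : Decidable (Spec_print_uk_flag num out) := by unfold Spec_print_uk_flag; infer_instance

-- ===== CLAIM (what is proved, stated in full; the proofs are below) =====
def Claim_equal_print_uk_flag : Prop := ∀ (num : Int), Dom_print_uk_flag num → Spec_print_uk_flag num (print_uk_flag num)

-- ===== LEMMAS AND PROOFS =====
-- A's row i (with the invariant end = num - 1 - i substituted)
def pvRowA (num mid i : Int) : List Int :=
  (PySem.List.pyRange 0 num 1).map
    (fun j => if i = j ∨ i = mid ∨ j = mid ∨ j = num - 1 - i then (0 : Int) else 1)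

theorem pvA_outer (num mid : Int) (t : Nat) :
    ∀ (a : Int) (acc : List (List Int)), (num - a).toNat = t →
    ((PySem.List.pyRange a num 1).foldl
      (fun (st : List (List Int) × Int) i =>
        (st.1 ++ [(PySem.List.pyRange 0 num 1).foldl
            (fun cur j =>
              cur ++ [if i = j ∨ i = mid ∨ j = mid ∨ j = st.2 then (0 : Int) else 1]) []],
         st.2 - 1))
      (acc, num - 1 - a)).1
    = acc ++ (PySem.List.pyRange a num 1).map (pvRowA num mid) := by
  induction t with
  | zero =>
    intro a acc h
    rw [show PySem.List.pyRange a num 1 = [] from PySem.List.pyRange_one_eq_nil (by omega)]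
    simp
  | succ t ih =>
    intro a acc h
    rw [show PySem.List.pyRange a num 1 = a :: PySem.List.pyRange (a + 1) num 1 from
      PySem.List.pyRange_one_cons (by omega)]
    simp only [List.foldl_cons]
    have h2 : num - 1 - a - 1 = num - 1 - (a + 1) := by ring
    rw [h2, ih (a + 1) _ (by omega)]
    rw [PySem.List.foldl_append_singleton_eq_map]
    simp [pvRowA, List.append_assoc]

theorem pvA_eq (num : Int) :
    print_uk_flag num = (PySem.List.pyRange 0 num 1).map (pvRowA num (PySem.Int.floordiv num 2)) := by
  have := pvA_outer num (PySem.Int.floordiv num 2) (num - 0).toNat 0 [] rfl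
  simpa [print_uk_flag] using this

-- row i after B's three assignments
def pvPaint (num mid : Int) (r : List Int) (k : Nat) : List Int :=
  ((r.set k 0).set (num - 1 - (k : Int)).toNat 0).set mid.toNat 0

theorem pvB_step (num : Int) (g : List (List Int)) (i : Int) :
    (let g1 := g.set i.toNat ((g.getD i.toNat []).set i.toNat 0)
     let g2 := g1.set i.toNat ((g1.getD i.toNat []).set (num - 1 - i).toNat 0)
     g2.set i.toNat ((g2.getD i.toNat []).set (PySem.Int.floordiv num 2).toNat 0))
    = if h : i.toNat < g.length
      then g.set i.toNat (((g[i.toNat].set i.toNat 0).set (num - 1 - i).toNat 0).set (PySem.Int.floordiv num 2).toNat 0)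
      else g := by
  by_cases h : i.toNat < g.length
  · simp [h, List.getD_eq_getElem?_getD, List.set_set]
  · have h0 : g.set i.toNat ((g.getD i.toNat []).set i.toNat 0) = g :=
      List.set_eq_of_length_le (by omega)
    simp only [h0]
    have h1 : g.set i.toNat ((g.getD i.toNat []).set (num - 1 - i).toNat 0) = g :=
      List.set_eq_of_length_le (by omega)
    simp only [h1]
    simp [List.set_eq_of_length_le (by omega : g.length ≤ i.toNat), h]

theorem pvB_loop (num : Int) (t : Nat) :
    ∀ (a : Int) (g : List (List Int)), 0 ≤ a → (num - a).toNat = t →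
    ∀ (k : Nat),
    ((PySem.List.pyRange a num 1).foldl
      (fun g i =>
        let g1 := g.set i.toNat ((g.getD i.toNat []).set i.toNat 0)
        let g2 := g1.set i.toNat ((g1.getD i.toNat []).set (num - 1 - i).toNat 0)
        g2.set i.toNat ((g2.getD i.toNat []).set (PySem.Int.floordiv num 2).toNat 0))
      g)[k]?
    = if a ≤ (k : Int) ∧ (k : Int) < num
      then (g[k]?).map (fun r => pvPaint num (PySem.Int.floordiv num 2) r k)
      else g[k]? := by
  induction t with
  | zero =>
    intro a g ha h k
    rw [show PySem.List.pyRange a num 1 = [] from PySem.List.pyRange_one_eq_nil (by omega)]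
    simp only [List.foldl_nil]
    rw [if_neg (by omega)]
  | succ t ih =>
    intro a g ha h k
    rw [show PySem.List.pyRange a num 1 = a :: PySem.List.pyRange (a + 1) num 1 from
      PySem.List.pyRange_one_cons (by omega)]
    simp only [List.foldl_cons]
    rw [pvB_step]
    by_cases hlen : a.toNat < g.length
    · rw [dif_pos hlen, ih (a + 1) _ (by omega) (by omega) k, List.getElem?_set]
      by_cases hk : a.toNat = k
      · rw [if_neg (show ¬((a : Int) + 1 ≤ (k : Int) ∧ (k : Int) < num) by omega)]
        rw [if_pos hk, if_pos hlen]
        rw [if_pos (show a ≤ (k : Int) ∧ (k : Int) < num by omega)]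
        subst hk
        rw [List.getElem?_eq_getElem hlen]
        simp only [Option.map_some]
        congr 1
        simp only [pvPaint]
        congr 3
        omega
      · rw [if_neg hk]
        by_cases hin : (a : Int) + 1 ≤ (k : Int) ∧ (k : Int) < num
        · rw [if_pos hin, if_pos (show a ≤ (k : Int) ∧ (k : Int) < num by omega)]
        · rw [if_neg hin, if_neg (show ¬(a ≤ (k : Int) ∧ (k : Int) < num) by omega)]
    · rw [dif_neg hlen, ih (a + 1) _ (by omega) (by omega) k]
      by_cases hin1 : (a : Int) + 1 ≤ (k : Int) ∧ (k : Int) < num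
      · rw [if_pos hin1, if_pos (show a ≤ (k : Int) ∧ (k : Int) < num by omega)]
      · by_cases hin0 : a ≤ (k : Int) ∧ (k : Int) < num
        · rw [if_neg hin1, if_pos hin0, List.getElem?_eq_none (by omega)]
          simp
        · rw [if_neg hin1, if_neg hin0]

theorem pvRow_ne_mid (num : Int) (k : Nat) (hn : 0 < num) (hk : (k : Int) < num)
    (hm : k ≠ (PySem.Int.floordiv num 2).toNat) :
    pvRowA num (PySem.Int.floordiv num 2) (k : Int)
      = pvPaint num (PySem.Int.floordiv num 2) (List.replicate num.toNat 1) k := by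
  have hdm : PySem.Int.floordiv num 2 = num / 2 := PySem.Int.floordiv_eq_ediv_of_pos (by omega)
  have hmid : 0 ≤ PySem.Int.floordiv num 2 ∧ PySem.Int.floordiv num 2 < num := by
    rw [hdm]; omega
  apply List.ext_getElem
  · simp [pvRowA, pvPaint, PySem.List.length_pyRange_one]
  · intro j h1 h2
    have hj : j < num.toNat := by
      simpa [pvRowA, PySem.List.length_pyRange_one] using h1
    simp only [pvRowA, pvPaint]
    rw [List.getElem_map]
    rw [PySem.List.getElem_pyRange_one]
    rw [List.getElem_set, List.getElem_set, List.getElem_set, List.getElem_replicate]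
    split_ifs <;> first | rfl | omega

theorem pvRow_mid (num : Int) (hn : 0 < num) :
    pvRowA num (PySem.Int.floordiv num 2) (((PySem.Int.floordiv num 2).toNat : Nat) : Int)
      = List.replicate num.toNat 0 := by
  have hdm : PySem.Int.floordiv num 2 = num / 2 := PySem.Int.floordiv_eq_ediv_of_pos (by omega)
  have hge : (((PySem.Int.floordiv num 2).toNat : Nat) : Int) = PySem.Int.floordiv num 2 := by
    rw [hdm]; omega
  rw [hge]
  apply List.ext_getElem
  · simp [pvRowA, PySem.List.length_pyRange_one]
  · intro j h1 h2
    simp only [pvRowA]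
    rw [List.getElem_map, PySem.List.getElem_pyRange_one]
    simp

theorem pvB_loop_len (num : Int) (L : List Int) :
    ∀ (g : List (List Int)),
    (L.foldl
      (fun g i =>
        let g1 := g.set i.toNat ((g.getD i.toNat []).set i.toNat 0)
        let g2 := g1.set i.toNat ((g1.getD i.toNat []).set (num - 1 - i).toNat 0)
        g2.set i.toNat ((g2.getD i.toNat []).set (PySem.Int.floordiv num 2).toNat 0))
      g).length = g.length := by
  induction L with
  | nil => intro g; rfl
  | cons x xs ih => intro g; rw [List.foldl_cons, ih]; simp

theorem print_uk_flag_spec : Claim_equal_print_uk_flag := by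
  intro num _
  unfold Spec_print_uk_flag
  rw [pvA_eq]
  simp only [print_uk_flag_alt]
  by_cases hn : 0 < num
  · have hdm : PySem.Int.floordiv num 2 = num / 2 := PySem.Int.floordiv_eq_ediv_of_pos (by omega)
    have hmid : 0 ≤ PySem.Int.floordiv num 2 ∧ PySem.Int.floordiv num 2 < num := by rw [hdm]; omega
    have hmn : (PySem.Int.floordiv num 2).toNat < num.toNat := by omega
    rw [if_pos hn]
    have hg0len : ((PySem.List.pyRange 0 num 1).map (fun _ => List.replicate num.toNat (1:Int))).length = num.toNat := by
      simp [PySem.List.length_pyRange_one]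
    apply List.ext_getElem?
    intro k
    rw [List.getElem?_set]
    rw [pvB_loop num (num - 0).toNat 0 _ (by omega) rfl k]
    rw [pvB_loop_len]
    rw [hg0len]
    by_cases hkm : (PySem.Int.floordiv num 2).toNat = k
    · rw [if_pos hkm]
      subst hkm
      rw [if_pos hmn]
      rw [List.getElem?_map]
      rw [List.getElem?_eq_getElem (by simp [PySem.List.length_pyRange_one]; omega)]
      rw [Option.map_some]
      rw [show (PySem.List.pyRange 0 num 1)[(PySem.Int.floordiv num 2).toNat]'(by
            simp [PySem.List.length_pyRange_one]; omega)
          = 0 + (((PySem.Int.floordiv num 2).toNat : Nat) : Int) from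
          PySem.List.getElem_pyRange_one ..]
      rw [zero_add, pvRow_mid num hn]
    · rw [if_neg hkm]
      by_cases hk : k < num.toNat
      · have hg0 : ((PySem.List.pyRange 0 num 1).map (fun _ => List.replicate num.toNat (1:Int)))[k]?
            = some (List.replicate num.toNat 1) := by
          rw [List.getElem?_map]
          rw [List.getElem?_eq_getElem (by simp [PySem.List.length_pyRange_one]; omega)]
          rfl
        rw [if_pos (show (0 : Int) ≤ (k : Int) ∧ (k : Int) < num by constructor <;> omega)]
        rw [hg0, Option.map_some]
        rw [List.getElem?_map]
        rw [List.getElem?_eq_getElem (by simp [PySem.List.length_pyRange_one]; omega)]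
        rw [Option.map_some]
        rw [show (PySem.List.pyRange 0 num 1)[k]'(by
              simp [PySem.List.length_pyRange_one]; omega)
            = 0 + ((k : Nat) : Int) from PySem.List.getElem_pyRange_one ..]
        rw [zero_add, pvRow_ne_mid num k hn (by omega) (fun h => hkm h.symm)]
      · rw [if_neg (show ¬((0 : Int) ≤ (k : Int) ∧ (k : Int) < num) by omega)]
        rw [List.getElem?_eq_none (by simp [PySem.List.length_pyRange_one]; omega)]
        rw [List.getElem?_eq_none (by simp [PySem.List.length_pyRange_one]; omega)]
  · rw [show PySem.List.pyRange 0 num 1 = [] from PySem.List.pyRange_one_eq_nil (by omega)]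
    simp [hn]
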